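-- pv_equiv track=rewrite | github.com/arry-lee/TIS | tis/awesometable/awesometable.py | count_padding
-- ===== SOURCE A (Python) =====
-- def count_padding(text):
--     """计算字符串的前缀空格数和后缀空格数
--
--     :param text: str
--     :return: tuple[int,int]
--     """
--     lpad, rpad = 0, 0
--     for i in text:
--         if i == " ":
--             lpad += 1
--         else:
--             break
--     for i in text[::-1]:
--         if i == " ":
--             rpad += 1
--         else:
--             break
--     return lpad, rpad
-- ===== SOURCE B (Python) =====
-- def count_padding(text):
--     """计算字符串的前缀空格数和后缀空格数
--
--     :param text: str
--     :return: tuple[int,int]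
--     """
--     first = last = None
--     for i, ch in enumerate(text):
--         if ch != " ":
--             if first is None:
--                 first = i
--             last = i
--     n = len(text)
--     if first is None:
--         return (n, n)
--     return (first, n - 1 - last)
-- ===== Notes on version B (the rewrite author's own statement) =====
-- stated objective: alternative
-- what changed: Replaces A's two end-scans (a forward scan plus a scan of the reversed string) by a single forward pass that records the first and last non-space index and derives both paddings from them.
import Mathlib
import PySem

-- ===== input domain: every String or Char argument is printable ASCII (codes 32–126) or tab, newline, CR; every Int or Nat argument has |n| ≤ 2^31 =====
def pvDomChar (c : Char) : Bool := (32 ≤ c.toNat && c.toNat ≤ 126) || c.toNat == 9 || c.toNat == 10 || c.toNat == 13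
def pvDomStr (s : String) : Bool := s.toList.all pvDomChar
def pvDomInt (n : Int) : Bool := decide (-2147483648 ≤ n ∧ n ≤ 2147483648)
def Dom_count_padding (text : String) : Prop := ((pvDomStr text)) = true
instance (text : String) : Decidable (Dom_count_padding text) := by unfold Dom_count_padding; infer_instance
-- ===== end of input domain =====

-- B replaces A's two end-scans (forward scan + scan of the reversed string) by ONE forward
-- pass that records the first and last non-space index; return-value equivalence only.

-- ===== PORT A =====
-- the 'for i in text: if i == " ": lpad += 1 else: break' loop, counting until the break
def pvScanSpaces : List Char → Int
  | [] => 0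
  | c :: cs => if c == ' ' then 1 + pvScanSpaces cs else 0

def count_padding (text : String) : Int × Int :=
  let lpad := pvScanSpaces text.toList
  let rpad := pvScanSpaces ((PySem.List.slice? text.toList none none (-1)).getD [])  -- text[::-1]; step -1 ≠ 0, never none
  (lpad, rpad)

-- ===== PORT B =====
-- loop body of Source B: on a non-space char set 'first' if still None, always update 'last'
def pvStep (st : Option Int × Option Int) (p : Int × Char) : Option Int × Option Int :=
  if p.2 ≠ ' ' then ((match st.1 with | none => some p.1 | some f => some f), some p.1) else st

def count_padding_alt (text : String) : Int × Int :=
  let st := (PySem.List.enumerate text.toList 0).foldl pvStep (none, none)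
  let n : Int := text.toList.length
  match st.1, st.2 with
  | none, _ => (n, n)
  | some f, some j => (f, n - 1 - j)
  | some f, none => (f, n)   -- unreachable: 'last' is set whenever 'first' is

-- ===== PRECONDITION & SPEC =====
def Spec_count_padding (text : String) (out : Int × Int) : Prop := out = count_padding_alt text
instance (text : String) (out : Int × Int) : Decidable (Spec_count_padding text out) := by unfold Spec_count_padding; infer_instance

-- ===== CLAIM =====
def Claim_equal_count_padding : Prop := ∀ (text : String), Dom_count_padding text → Spec_count_padding text (count_padding text)

-- ===== LEMMAS AND PROOFS =====

-- index of the first non-space character, counting from s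
def pvFirstNS : List Char → Int → Option Int
  | [], _ => none
  | c :: cs, s => if c ≠ ' ' then some s else pvFirstNS cs (s + 1)

-- index of the last non-space character, counting from s
def pvLastNS : List Char → Int → Option Int
  | [], _ => none
  | c :: cs, s =>
    match pvLastNS cs (s + 1) with
    | some j => some j
    | none => if c ≠ ' ' then some s else none

theorem pvScan_eq_takeWhile (l : List Char) :
    pvScanSpaces l = ((l.takeWhile (· == ' ')).length : Int) := by
  induction l with
  | nil => simp [pvScanSpaces]
  | cons c cs ih =>
    by_cases h : c == ' '
    · simp [pvScanSpaces, List.takeWhile, h, ih]; omega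
    · simp [pvScanSpaces, List.takeWhile, h]

theorem pvFold_spec (l : List Char) (s : Int) (f0 l0 : Option Int) :
    (PySem.List.enumerate l s).foldl pvStep (f0, l0) =
      ((match f0 with | some f => some f | none => pvFirstNS l s),
       (match pvLastNS l s with | some j => some j | none => l0)) := by
  induction l generalizing s f0 l0 with
  | nil => cases f0 <;> cases l0 <;> simp [PySem.List.enumerate_nil, pvFirstNS, pvLastNS]
  | cons c cs ih =>
    by_cases h : c = ' '
    · have hstep : pvStep (f0, l0) (s, c) = (f0, l0) := by simp [pvStep, h]
      rw [PySem.List.enumerate_cons, List.foldl_cons, hstep, ih]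
      simp only [pvFirstNS, pvLastNS]
      cases hl : pvLastNS cs (s + 1) <;> simp [h]
    · have hstep : pvStep (f0, l0) (s, c) =
          ((match f0 with | none => some s | some f => some f), some s) := by
        simp [pvStep, h]
      rw [PySem.List.enumerate_cons, List.foldl_cons, hstep, ih]
      simp only [pvFirstNS, pvLastNS]
      cases f0 <;> cases hl : pvLastNS cs (s + 1) <;> simp [h]

theorem pvFirstNS_spec (l : List Char) (s : Int) :
    pvFirstNS l s = if l.all (· == ' ') then none
      else some (s + ((l.takeWhile (· == ' ')).length : Int)) := by
  induction l generalizing s with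
  | nil => simp [pvFirstNS]
  | cons c cs ih =>
    by_cases h : c = ' '
    · simp only [pvFirstNS, h]
      rw [ih]
      by_cases ha : cs.all (· == ' ') <;> simp [ha, List.takeWhile] <;> omega
    · have hb : (c == ' ') = false := by simp [h]
      simp [pvFirstNS, h, List.takeWhile, hb]

theorem pvLastNS_append (xs ys : List Char) (s : Int) :
    pvLastNS (xs ++ ys) s =
      match pvLastNS ys (s + xs.length) with
      | some j => some j
      | none => pvLastNS xs s := by
  induction xs generalizing s with
  | nil => cases hl : pvLastNS ys s <;> simp [pvLastNS, hl]
  | cons c cs ih =>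
    simp only [List.cons_append, pvLastNS, ih, List.length_cons]
    push_cast
    have h2 : s + 1 + (cs.length : Int) = s + ((cs.length : Int) + 1) := by ring
    rw [h2]
    cases pvLastNS ys (s + ((cs.length : Int) + 1)) <;> cases pvLastNS cs (s + 1) <;> simp

theorem pvLastNS_spec (l : List Char) (s : Int) :
    pvLastNS l s = if l.all (· == ' ') then none
      else some (s + (l.length : Int) - 1 - ((l.reverse.takeWhile (· == ' ')).length : Int)) := by
  induction l using List.reverseRecOn generalizing s with
  | nil => simp [pvLastNS]
  | append_singleton xs c ih =>
    rw [pvLastNS_append]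
    by_cases h : c = ' '
    · simp only [pvLastNS, h]
      rw [ih]
      by_cases ha : xs.all (· == ' ') <;>
        simp [ha, h, List.takeWhile] <;> push_cast <;> omega
    · simp [pvLastNS, h]
      omega

theorem pv_all_takeWhile (l : List Char) (h : l.all (· == ' ')) :
    l.takeWhile (· == ' ') = l := by
  induction l with
  | nil => rfl
  | cons c cs ih =>
    simp only [List.all_cons, Bool.and_eq_true] at h
    simp [List.takeWhile, h.1, ih h.2]

-- ===== VERDICT =====
theorem count_padding_spec : Claim_equal_count_padding := by
  intro text _
  unfold Spec_count_padding count_padding count_padding_alt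
  simp only [PySem.List.slice?_none_none_neg_one, Option.getD_some]
  rw [pvFold_spec, pvFirstNS_spec, pvLastNS_spec]
  by_cases ha : text.toList.all (· == ' ')
  · have hrev : text.toList.reverse.all (· == ' ') := by simpa using ha
    simp only [ha, if_pos]
    rw [pvScan_eq_takeWhile, pvScan_eq_takeWhile,
        pv_all_takeWhile _ ha, pv_all_takeWhile _ hrev]
    simp
  · simp only [ha]
    rw [pvScan_eq_takeWhile, pvScan_eq_takeWhile]
    refine Prod.ext ?_ ?_ <;> simp
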